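-- pv_equiv track=rewrite | github.com/roelschlaeger/usexmltodict | python_projects/chkio/hidden_word/checkio.py | lines_transpose
-- ===== SOURCE A (Python) =====
-- def lines_transpose(s):
--     """Transpose the lines in s."""
-- #   s = s.lower().replace(" ", "")
--
--     # break in to lines
--     lines = s.split("\n")
--
--     # count the rows
--     rows = len(lines)
--
--     # count the longest line
--     cols = max([len(line) for line in lines])
--
--     # create a dictionary for output by column number
--     out = {}
--
--     # transpose the characters
--     for c in range(cols):
--
--         # start with an empty list
--         out.setdefault(c, [])
--
--         # search all rows
--         for r in range(rows):
--
--             # bring in one character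
--             try:
--                 c2 = lines[r][c]
--             except IndexError:
--                 c2 = " "
--
--             # append the character to the row
--             out[c].append(c2)
--
--     # turn the lists back into strings
--     result = []
--     for c in range(cols):
--         result.append("".join(out[c]))
--
--     return result
-- ===== SOURCE B (Python) =====
-- def lines_transpose(s):
--     """Transpose the lines in s."""
--     lines = s.split("\n")
--     width = max(map(len, lines))
--     padded = [line.ljust(width) for line in lines]
--     return ["".join(col) for col in zip(*padded)]
-- ===== Notes on version B (the rewrite author's own statement) =====
-- stated objective: idiomatic
-- what changed: Replaces the column dictionary and the per-cell try/except indexing with pad-to-width (ljust) followed by zip(*lines) transposition.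
import Mathlib
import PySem

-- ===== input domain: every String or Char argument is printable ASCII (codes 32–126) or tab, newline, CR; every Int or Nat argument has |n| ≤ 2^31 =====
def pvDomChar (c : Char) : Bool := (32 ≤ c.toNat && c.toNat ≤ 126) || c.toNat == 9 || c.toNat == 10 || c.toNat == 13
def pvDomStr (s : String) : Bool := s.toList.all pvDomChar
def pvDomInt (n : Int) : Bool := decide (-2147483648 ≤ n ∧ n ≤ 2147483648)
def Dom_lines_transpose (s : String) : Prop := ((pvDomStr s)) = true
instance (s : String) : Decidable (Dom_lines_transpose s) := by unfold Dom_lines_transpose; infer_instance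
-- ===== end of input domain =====

-- B transposes by padding each line to the maximum width and zipping, instead of A's
-- per-column dictionary filled by try/except indexing (objective: idiomatic; same cost).

-- ===== PORT A =====
def lines_transpose (s : String) : List String :=
  let lines := (PySem.Str.split? s "\n").getD []  -- sep ≠ "" so split? never returns none
  let rows : Int := (lines.length : Int)
  -- max([...]) over a nonempty list ('split' never returns []); the .getD 0 branch is unreachable
  let cols : Int := (PySem.List.max? (lines.map (fun line => PySem.Str.len line)) (fun x => x)).getD 0
  let out : PySem.Dict Int (List Char) :=
    (PySem.List.pyRange 0 cols 1).foldl (fun out c =>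
      let out := PySem.Dict.setdefault out c []
      (PySem.List.pyRange 0 rows 1).foldl (fun out r =>
        -- try: lines[r][c] except IndexError: " "  (either index may be out of range)
        let c2 : Char := ((PySem.List.pyGet? lines r).bind (fun line => PySem.Str.pyGet? line c)).getD ' '
        -- out[c].append(c2); key c is present (setdefault above), so the [] default never fires
        PySem.Dict.modify out c [] (fun l => l ++ [c2])) out) PySem.Dict.empty
  -- "".join(out[c]); key c always present, so the [] default never fires
  (PySem.List.pyRange 0 cols 1).foldl (fun result c =>
    result ++ [String.mk (PySem.Dict.getD out c [])]) []

-- ===== PORT B =====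
-- zip(*padded) on the rectangular padded matrix: all rows have length = fuel, so the
-- fuel-counted head/tail recursion is exact (the ' ' head default is never reached).
def zipCols : Nat → List (List Char) → List (List Char)
  | 0, _ => []
  | n + 1, rws => rws.map (fun r => r.headD ' ') :: zipCols n (rws.map List.tail)

def lines_transpose_alt (s : String) : List String :=
  let lines := (PySem.Str.split? s "\n").getD []  -- sep ≠ "" so split? never returns none
  let width : Int := (PySem.List.max? (lines.map (fun line => PySem.Str.len line)) (fun x => x)).getD 0
  -- line.ljust(width): pad with spaces on the right (width ≥ len(line) here)
  let padded := lines.map (fun line => line.toList ++ List.replicate (width.toNat - line.toList.length) ' ')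
  (zipCols width.toNat padded).map String.mk

-- ===== PRECONDITION & SPEC =====
def Spec_lines_transpose (s : String) (out : List String) : Prop := out = lines_transpose_alt s
instance (s : String) (out : List String) : Decidable (Spec_lines_transpose s out) := by unfold Spec_lines_transpose; infer_instance

-- ===== CLAIM (what is proved, stated in full; the proofs are below) =====
def Claim_equal_lines_transpose : Prop := ∀ (s : String), Dom_lines_transpose s → Spec_lines_transpose s (lines_transpose s)

-- ===== LEMMAS AND PROOFS =====

-- getD version of PySem.Dict.get?_setdefault_of_ne (only the get? form is in the library).
theorem getD_setdefault_ne (d : PySem.Dict Int (List Char)) (k k' : Int) (v d0 : List Char)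
    (h : k' ≠ k) : (d.setdefault k v).getD k' d0 = d.getD k' d0 := by
  simp [PySem.Dict.getD, PySem.Dict.get?_setdefault_of_ne d v h]

-- A's inner row loop appends column c's characters to out[c] (fixed key c).
theorem getD_foldl_modify_fixed (rs : List Int) (d : PySem.Dict Int (List Char)) (c c' : Int)
    (f : Int → Char) :
    (rs.foldl (fun d r => PySem.Dict.modify d c [] (fun l => l ++ [f r])) d).getD c' []
      = d.getD c' [] ++ (if c' = c then rs.map f else []) := by
  induction rs generalizing d with
  | nil => simp
  | cons r rs ih =>
    simp only [List.foldl_cons, ih, PySem.Dict.getD_modify]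
    split_ifs with h <;> simp [h]

-- A's outer column loop: getD at a key not in the remaining columns is unchanged.
theorem outer_invariant (cs : List Int) (rows : Int) (lines : List String)
    (d : PySem.Dict Int (List Char)) (c : Int) (hc : c ∉ cs) :
    (cs.foldl (fun out c0 =>
        (PySem.List.pyRange 0 rows 1).foldl (fun out r =>
          PySem.Dict.modify out c0 []
            (fun l => l ++ [((PySem.List.pyGet? lines r).bind (fun line => PySem.Str.pyGet? line c0)).getD ' '])) (PySem.Dict.setdefault out c0 [])) d).getD c []
      = d.getD c [] := by
  induction cs generalizing d with
  | nil => rfl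
  | cons c0 cs ih =>
    simp only [List.mem_cons, not_or] at hc
    simp only [List.foldl_cons, ih _ hc.2, getD_foldl_modify_fixed, if_neg hc.1,
      List.append_nil, getD_setdefault_ne _ _ _ _ _ hc.1]

-- A's outer column loop: getD at a processed key c is exactly column c.
theorem outer_getD (cs : List Int) (rows : Int) (lines : List String)
    (d : PySem.Dict Int (List Char)) (c : Int) (hnd : cs.Nodup) (hc : c ∈ cs)
    (h0 : d.getD c [] = []) :
    (cs.foldl (fun out c0 =>
        (PySem.List.pyRange 0 rows 1).foldl (fun out r =>
          PySem.Dict.modify out c0 []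
            (fun l => l ++ [((PySem.List.pyGet? lines r).bind (fun line => PySem.Str.pyGet? line c0)).getD ' '])) (PySem.Dict.setdefault out c0 [])) d).getD c []
      = (PySem.List.pyRange 0 rows 1).map
          (fun r => ((PySem.List.pyGet? lines r).bind (fun line => PySem.Str.pyGet? line c)).getD ' ') := by
  induction cs generalizing d with
  | nil => cases hc
  | cons c0 cs ih =>
    simp only [List.nodup_cons] at hnd
    rcases List.mem_cons.1 hc with rfl | hmem
    · simp only [List.foldl_cons, outer_invariant cs rows lines _ c hnd.1,
        getD_foldl_modify_fixed, PySem.Dict.getD_setdefault_self, h0,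
        List.nil_append]
      simp
    · have hne : c ≠ c0 := fun h => hnd.1 (h ▸ hmem)
      simp only [List.foldl_cons]
      rw [ih _ hnd.2 hmem]
      simp [getD_foldl_modify_fixed, if_neg hne,
        getD_setdefault_ne _ _ _ _ _ hne, h0]

-- (range xs.length).map (h xs[i]?) reads each element exactly once.
theorem map_range_length {α β : Type} (xs : List α) (h : Option α → β) :
    (List.range xs.length).map (fun i => h xs[i]?) = xs.map (fun x => h (some x)) := by
  induction xs with
  | nil => rfl
  | cons x t ih =>
    simp only [List.length_cons, List.range_succ_eq_map, List.map_cons, List.map_map]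
    refine congrArg₂ _ rfl ?_
    simpa using ih

-- B's zip recursion produces the indexed columns.
theorem zipCols_eq (n : Nat) (rws : List (List Char)) :
    zipCols n rws = (List.range n).map (fun c => rws.map (fun r => (r[c]?).getD ' ')) := by
  induction n generalizing rws with
  | zero => rfl
  | succ n ih =>
    simp only [zipCols, List.range_succ_eq_map, List.map_cons, List.map_map, ih]
    refine congrArg₂ _ ?_ ?_
    · refine List.map_congr_left fun r _ => ?_
      cases r <;> rfl
    · refine List.map_congr_left fun c _ => ?_
      simp only [Function.comp]
      refine List.map_congr_left fun r _ => ?_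
      simp [List.getElem?_tail]

-- a padded cell reads as getD into the original line when the column is in range.
theorem padded_cell (l : List Char) (wn cn : Nat) (hlen : l.length ≤ wn) (hcn : cn < wn) :
    ((l ++ List.replicate (wn - l.length) ' ')[cn]?).getD ' ' = (l[cn]?).getD ' ' := by
  by_cases h : cn < l.length
  · rw [List.getElem?_append_left h]
  · have h1 : l[cn]? = none := List.getElem?_eq_none (by omega)
    have h2 : cn - l.length < wn - l.length := by omega
    rw [List.getElem?_append_right (by omega), h1]
    simp [h2]

-- the heart of the proof: A's fold-built result equals B's zip of the padded matrix,
-- for any line list L and any width w ≥ 0 that bounds every line length.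
theorem transpose_core (L : List String) (w : Int) (hw0 : 0 ≤ w)
    (hbound : ∀ line ∈ L, (line.toList.length : Int) ≤ w) :
    (PySem.List.pyRange 0 w).foldl (fun result c =>
        result ++ [String.mk (((PySem.List.pyRange 0 w).foldl (fun out c =>
            (PySem.List.pyRange 0 (L.length : Int)).foldl (fun out r =>
              PySem.Dict.modify out c []
                (fun l => l ++ [((PySem.List.pyGet? L r).bind (fun line => PySem.Str.pyGet? line c)).getD ' ']))
              (PySem.Dict.setdefault out c [])) PySem.Dict.empty).getD c [])]) []
      = (zipCols w.toNat (L.map (fun line => line.toList ++ List.replicate (w.toNat - line.toList.length) ' '))).map String.mk := by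
  obtain ⟨wn, rfl⟩ : ∃ n : Nat, w = (n : Int) := ⟨w.toNat, (Int.toNat_of_nonneg hw0).symm⟩
  rw [PySem.List.foldl_append_singleton_eq_map, List.nil_append, zipCols_eq,
    PySem.List.pyRange_zero_natCast wn]
  simp only [Int.toNat_natCast, List.map_map]
  refine List.map_congr_left fun cn hcn => ?_
  have hcnw : cn < wn := List.mem_range.1 hcn
  have hnodup : (List.map (fun k : Nat => (k : Int)) (List.range wn)).Nodup :=
    (List.nodup_range).map (fun a b => by omega)
  have hmem : ((cn : Nat) : Int) ∈ List.map (fun k : Nat => (k : Int)) (List.range wn) :=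
    List.mem_map_of_mem hcn
  simp only [Function.comp_def]
  rw [outer_getD _ _ _ _ _ hnodup hmem rfl]
  refine congrArg String.mk ?_
  rw [PySem.List.pyRange_zero_natCast L.length]
  simp only [List.map_map, Function.comp_def, PySem.List.pyGet?_natCast]
  rw [map_range_length L (fun o => ((o.bind (fun line => PySem.Str.pyGet? line ((cn : Nat) : Int))).getD ' '))]
  simp only [Option.bind_some]
  refine List.map_congr_left fun line hline => ?_
  have hlenb : line.toList.length ≤ wn := by
    have := hbound line hline; omega
  rw [PySem.Str.pyGet?_natCast]
  exact (padded_cell line.toList wn cn hlenb hcnw).symm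

-- ===== VERDICT (by name: the statement is the Claim_ definition above) =====
theorem lines_transpose_spec : Claim_equal_lines_transpose := by
  intro s _
  unfold Spec_lines_transpose
  simp only [lines_transpose, lines_transpose_alt]
  refine transpose_core _ _ ?_ ?_
  · cases hmax : PySem.List.max? (((PySem.Str.split? s "\n").getD []).map (fun line => PySem.Str.len line)) (fun x => x) with
    | none => simp
    | some m =>
      obtain ⟨y, hy, hym⟩ := List.mem_map.1 (PySem.List.max?_mem hmax)
      simp only [Option.getD_some]
      rw [← hym, PySem.Str.len_eq]
      exact Int.natCast_nonneg _
  · intro line hline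
    cases hmax : PySem.List.max? (((PySem.Str.split? s "\n").getD []).map (fun line => PySem.Str.len line)) (fun x => x) with
    | none =>
      exact absurd ((PySem.List.max?_eq_none_iff _ _).1 hmax) (List.ne_nil_of_mem (List.mem_map_of_mem hline))
    | some m =>
      have h := PySem.List.max?_isMax hmax (PySem.Str.len line) (List.mem_map_of_mem hline)
      simpa [PySem.Str.len_eq] using h
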